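-- pv_equiv track=rewrite | github.com/InvictusMalum/Advent-Of-Code-2015 | day10.py | fakeLookAndSay
-- ===== SOURCE A (Python) =====
-- def fakeLookAndSay(number):
--     out = ''
--
--     digitCounts = {}
--     number = str(number)
--     for char in number:
--         if char not in digitCounts:
--             digitCounts[char] = 1
--         else:
--             digitCounts[char] += 1
--
--     for digit in digitCounts:
--         out += str(digitCounts[digit]) + digit
--
--     return out
-- ===== SOURCE B (Python) =====
-- def fakeLookAndSay(number):
--     # Peel-and-remove recursion: take the first remaining character, count it by
--     # deleting all its copies (length difference), emit, recurse on the remainder.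
--     def go(s):
--         if not s:
--             return ''
--         c = s[0]
--         rest = s.replace(c, '')
--         return str(len(s) - len(rest)) + c + go(rest)
--     return go(str(number))
-- ===== Notes on version B (the rewrite author's own statement) =====
-- stated objective: alternative
-- what changed: Replaces A's dict-accumulating single pass plus items loop by a peel-and-remove recursion: repeatedly take the first remaining character, count it as the length drop after deleting all its copies with str.replace, emit, and recurse on the shrunken remainder (no dictionary at all).
import Mathlib
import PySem

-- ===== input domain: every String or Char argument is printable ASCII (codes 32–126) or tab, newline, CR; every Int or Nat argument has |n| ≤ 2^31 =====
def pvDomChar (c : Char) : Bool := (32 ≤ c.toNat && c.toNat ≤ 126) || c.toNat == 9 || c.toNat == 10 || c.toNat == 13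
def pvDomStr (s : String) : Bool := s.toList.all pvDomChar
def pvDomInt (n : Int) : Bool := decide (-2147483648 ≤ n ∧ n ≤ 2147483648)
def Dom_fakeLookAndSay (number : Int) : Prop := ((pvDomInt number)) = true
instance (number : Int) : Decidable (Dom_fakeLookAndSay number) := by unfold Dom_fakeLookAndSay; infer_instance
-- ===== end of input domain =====

-- B replaces A's dict-accumulating pass + items loop by a peel-and-remove recursion
-- (count the first character by the length drop of str.replace, recurse on the rest);
-- alternative decomposition, same return value.

-- ===== PORT A =====
def fakeLookAndSay (number : Int) : String :=
  let s := PySem.Int.toChars number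
  let digitCounts : PySem.Dict Char Int :=
    s.foldl (fun d c =>
      if d.contains c = false then d.insert c 1
      else d.insert c (d.getD c 0 + 1)) PySem.Dict.empty
  String.ofList (digitCounts.items.foldl
    (fun out p => out ++ (PySem.Int.toChars p.2 ++ [p.1])) [])

-- ===== PORT B =====
-- go s: if s empty return ''; else c = s[0], rest = s.replace(c, ''),
-- emit str(len(s)-len(rest)) + c, recurse on rest.
def fakeLookAndSayGo : List Char → List Char
  | [] => []
  | c :: t =>
    let rest := (c :: t).filter (fun x => x ≠ c)
    PySem.Int.toChars (((c :: t).length : Int) - (rest.length : Int))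
      ++ c :: fakeLookAndSayGo rest
  termination_by s => s.length
  decreasing_by
    simp
    exact List.length_filter_le _ _

def fakeLookAndSay_alt (number : Int) : String :=
  String.ofList (fakeLookAndSayGo (PySem.Int.toChars number))

-- ===== PRECONDITION & SPEC =====
def Spec_fakeLookAndSay (number : Int) (out : String) : Prop := out = fakeLookAndSay_alt number
instance (number : Int) (out : String) : Decidable (Spec_fakeLookAndSay number out) := by unfold Spec_fakeLookAndSay; infer_instance

-- ===== CLAIM (what is proved, stated in full; the proofs are below) =====
def Claim_equal_fakeLookAndSay : Prop := ∀ (number : Int), Dom_fakeLookAndSay number → Spec_fakeLookAndSay number (fakeLookAndSay number)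

-- ===== LEMMAS AND PROOFS =====

-- A's branched counting step is exactly the Counter step: when the key is absent its getD is 0.
theorem pv_step_eq :
    (fun (d : PySem.Dict Char Int) c =>
      if d.contains c = false then d.insert c 1
      else d.insert c (d.getD c 0 + 1)) =
    (fun (d : PySem.Dict Char Int) c => d.insert c (d.getD c 0 + 1)) := by
  funext d c
  by_cases h : d.contains c = false
  · have hn : d.get? c = none := by
      rw [← Option.not_isSome_iff_eq_none, ← PySem.Dict.contains_eq_isSome_get?]
      simp [h]
    simp [h, PySem.Dict.getD, hn]
  · simp [h]

-- ofList of a list not containing c, started after c, prepends c.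
theorem pv_foldl_add_cons {α : Type} [DecidableEq α] (l : List α) (acc : List α) (c : α)
    (hc : c ∉ l) :
    l.foldl PySem.Set.add (c :: acc) = c :: l.foldl PySem.Set.add acc := by
  induction l generalizing acc with
  | nil => rfl
  | cons x xs ih =>
    have hxc : x ≠ c := fun h => hc (h ▸ List.mem_cons_self)
    have hstep : PySem.Set.add (c :: acc) x =
        c :: PySem.Set.add acc x := by
      simp [PySem.Set.add, PySem.Set.contains, hxc]
      split_ifs <;> simp
    rw [List.foldl_cons, List.foldl_cons, hstep,
      ih _ (fun h => hc (List.mem_cons_of_mem _ h))]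

-- once c is in the accumulator, occurrences of c in the list are ignored by Set.add.
theorem pv_foldl_add_filter {α : Type} [DecidableEq α] (l : List α) (acc : List α) (c : α)
    (hc : c ∈ acc) :
    l.foldl PySem.Set.add acc = (l.filter (fun x => x ≠ c)).foldl PySem.Set.add acc := by
  induction l generalizing acc with
  | nil => rfl
  | cons x xs ih =>
    by_cases hx : x = c
    · subst hx
      have : PySem.Set.add acc x = acc := by
        simp [PySem.Set.add, PySem.Set.contains, hc]
      simp only [List.filter_cons, ne_eq, not_true_eq_false,
        decide_false, List.foldl_cons, this]
      exact ih acc hc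
    · simp only [List.filter_cons, ne_eq, hx, not_false_eq_true, decide_true,
        List.foldl_cons]
      refine ih _ ?_
      simp [PySem.Set.add]
      split_ifs <;> simp [hc]

-- first-occurrence dedup peels off the head and drops its later copies.
theorem pv_ofList_cons {α : Type} [DecidableEq α] (c : α) (t : List α) :
    PySem.Set.ofList (c :: t) = c :: PySem.Set.ofList (t.filter (fun x => x ≠ c)) := by
  rw [PySem.Set.ofList_eq_foldl, PySem.Set.ofList_eq_foldl]
  have h0 : PySem.Set.add ([] : List α) c = [c] := by
    simp [PySem.Set.add, PySem.Set.contains]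
  rw [List.foldl_cons, h0,
    pv_foldl_add_filter t [c] c List.mem_cons_self,
    pv_foldl_add_cons _ _ _ (by simp)]

-- the length drop after removing every copy of c is the count of c.
theorem pv_count_len {α : Type} [DecidableEq α] (t : List α) (c : α) :
    t.count c + (t.filter (fun x => x ≠ c)).length = t.length := by
  induction t with
  | nil => rfl
  | cons x xs ih =>
    by_cases hx : x = c
    · subst hx
      rw [List.count_cons_self, List.filter_cons_of_neg (by simp), List.length_cons]
      omega
    · rw [List.count_cons_of_ne hx, List.filter_cons_of_pos (by simp [hx]),
        List.length_cons, List.length_cons]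
      omega

-- characterisation of B's recursion: count+digit over the distinct characters in order.
theorem pv_go_eq (s : List Char) :
    fakeLookAndSayGo s =
      (PySem.Set.ofList s).flatMap
        (fun d => PySem.Int.toChars (s.count d : Int) ++ [d]) := by
  induction hn : s.length using Nat.strong_induction_on generalizing s with
  | _ n ih =>
    match s with
    | [] => rw [fakeLookAndSayGo.eq_def]; rfl
    | c :: t =>
      rw [fakeLookAndSayGo.eq_def]
      dsimp only
      have hfe : (c :: t).filter (fun x => x ≠ c) = t.filter (fun x => x ≠ c) := by
        simp
      have hlt : (t.filter (fun x => x ≠ c)).length < n := by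
        subst hn
        exact Nat.lt_succ_of_le (List.length_filter_le _ _)
      rw [hfe, ih _ hlt _ rfl, pv_ofList_cons]
      have hcount : (((c :: t).length : Int) - ((t.filter (fun x => x ≠ c)).length : Int))
          = ((c :: t).count c : Int) := by
        have h := pv_count_len t c
        rw [List.length_cons, List.count_cons_self]
        push_cast
        omega
      rw [List.flatMap_cons, hcount, List.append_assoc, List.singleton_append]
      congr 2
      refine List.flatMap_congr (fun d hd => ?_)
      have hdne : d ≠ c := by
        have hm := (PySem.Set.mem_ofList _ _).mp hd
        have := List.of_mem_filter hm
        simpa using this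
      have hc : (c :: t).count d = (t.filter (fun x => x ≠ c)).count d := by
        rw [List.count_cons_of_ne (Ne.symm hdne), List.count_filter (by simpa using hdne)]
      rw [hc]

-- ===== VERDICT (by name: the statement is the Claim_ definition above) =====
theorem fakeLookAndSay_spec : Claim_equal_fakeLookAndSay := by
  intro number _
  unfold Spec_fakeLookAndSay fakeLookAndSay fakeLookAndSay_alt
  simp only [pv_step_eq, PySem.Dict.foldl_insert_getD_add_one_eq_counter,
    PySem.Dict.items_counter, PySem.List.foldl_append_eq_flatMap,
    List.flatMap_map, List.nil_append, pv_go_eq]
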